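-- pv_equiv track=rewrite | github.com/yarkoslav/team_project | evil_AI_numbers.py | ulam_sequence
-- ===== SOURCE A (Python) =====
-- def ulam_sequence(num: int) -> list:
--     '''
--     Return the list of all Ulam's numbers, which are <= num
--
--     >>> ulam_sequence(1)
--     [1]
--     >>> ulam_sequence(2)
--     [1, 2]
--     >>> ulam_sequence(25)
--     [1, 2, 3, 4, 6, 8, 11, 13, 16, 18]
--     '''
--     if num == 1:
--         sequence = [1]
--     elif num == 2:
--         sequence = [1, 2]
--     else:
--         sequence = [1, 2]
--         count_sums = [0 for i in range(2 * num)]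
--         count_sums[2] = 1
--         new_number = 3
--         while new_number <= num:
--             if count_sums[new_number - 1] == 1:
--                 for ulam_num in sequence:
--                     new_sum = ulam_num + new_number
--                     count_sums[new_sum - 1] += 1
--                 sequence.append(new_number)
--             new_number += 1
--     return sequence
-- ===== SOURCE B (Python) =====
-- def ulam_sequence(num: int) -> list:
--     if num == 1:
--         return [1]
--     sequence = [1, 2]
--     is_ulam = [False] * (num + 1)
--     is_ulam[1] = True
--     is_ulam[2] = True
--     for n in range(3, num + 1):
--         reps = 0
--         for u in sequence:
--             if 2 * u >= n:
--                 break
--             if is_ulam[n - u]: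
--                 reps += 1
--                 if reps == 2:
--                     break
--         if reps == 1:
--             sequence.append(n)
--             is_ulam[n] = True
--     return sequence
-- ===== Notes on version B (the rewrite author's own statement) =====
-- stated objective: alternative
-- what changed: B drops A's incrementally maintained count_sums table of pair sums and instead, for each candidate n, recomputes the representation count by rescanning the ascending sequence against a boolean membership bitmap, stopping at 2*u >= n or at a second representation, and appends n iff the count is 1.
import Mathlib
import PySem

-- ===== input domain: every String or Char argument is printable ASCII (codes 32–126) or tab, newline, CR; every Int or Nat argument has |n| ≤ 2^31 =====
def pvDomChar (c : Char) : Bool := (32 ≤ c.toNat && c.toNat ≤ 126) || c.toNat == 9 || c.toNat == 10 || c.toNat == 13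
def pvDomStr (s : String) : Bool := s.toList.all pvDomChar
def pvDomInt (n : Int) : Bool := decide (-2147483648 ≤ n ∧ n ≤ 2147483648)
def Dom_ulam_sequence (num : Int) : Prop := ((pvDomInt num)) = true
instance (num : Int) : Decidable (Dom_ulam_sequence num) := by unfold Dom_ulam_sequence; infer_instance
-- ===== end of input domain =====

-- B drops A's incrementally maintained count_sums table and instead re-derives each candidate's
-- representation count by rescanning the sequence against a membership bitmap (objective: alternative).
-- Both ports keep their Python's int-indexed lists as Arrays (same elements, positions and updates;
-- under Pre_ every index is in range, as in the Python).

-- ===== PORT A =====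
-- body of A's while-loop (one candidate new_number)
def ulamStepA (st : List Int × Array Int) (new_number : Int) : List Int × Array Int :=
  let sequence := st.1
  let count_sums := st.2
  if count_sums.getD (new_number - 1).toNat 0 = 1 then
    let count_sums := sequence.foldl (fun cs ulam_num =>
      let new_sum := ulam_num + new_number
      cs.setIfInBounds (new_sum - 1).toNat (cs.getD (new_sum - 1).toNat 0 + 1)) count_sums
    (sequence ++ [new_number], count_sums)
  else (sequence, count_sums)

def ulam_sequence (num : Int) : List Int :=
  if num = 1 then [1]
  else if num = 2 then [1, 2]
  else
    let count_sums := ((PySem.List.pyRange 0 (2 * num) 1).map (fun _ => (0 : Int))).toArray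
    let count_sums := count_sums.setIfInBounds 2 1
    ((PySem.List.pyRange 3 (num + 1) 1).foldl ulamStepA ([1, 2], count_sums)).1

-- ===== PORT B =====
-- B's inner scan: walk the (ascending) sequence, stop at 2*u >= n or at a second representation
def ulamRepsGo (is_ulam : Array Bool) (n : Int) : List Int → Int → Int
  | [], reps => reps
  | u :: us, reps =>
    if 2 * u ≥ n then reps
    else if is_ulam.getD (n - u).toNat false then
      (if reps + 1 = 2 then reps + 1 else ulamRepsGo is_ulam n us (reps + 1))
    else ulamRepsGo is_ulam n us reps

-- body of B's for-loop (one candidate n)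
def ulamStepB (st : List Int × Array Bool) (n : Int) : List Int × Array Bool :=
  let sequence := st.1
  let is_ulam := st.2
  let reps := ulamRepsGo is_ulam n sequence 0
  if reps = 1 then (sequence ++ [n], is_ulam.setIfInBounds n.toNat true) else (sequence, is_ulam)

def ulam_sequence_alt (num : Int) : List Int :=
  if num = 1 then [1]
  else
    let is_ulam := ((Array.replicate (num + 1).toNat false).setIfInBounds 1 true).setIfInBounds 2 true
    ((PySem.List.pyRange 3 (num + 1) 1).foldl ulamStepB ([1, 2], is_ulam)).1

-- ===== PRECONDITION & SPEC =====
-- Pre_ excludes exactly num ≤ 0, where A raises IndexError (count_sums[2] = 1 on a list of length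
-- 2*num ≤ 0); B also raises IndexError there (is_ulam[1] on a list of length num + 1 ≤ 1).
def Pre_ulam_sequence (num : Int) : Prop := 1 ≤ num
instance (num : Int) : Decidable (Pre_ulam_sequence num) := by unfold Pre_ulam_sequence; infer_instance
def pvWitness_ulam_sequence : Int := (25)

def Spec_ulam_sequence (num : Int) (out : List Int) : Prop := out = ulam_sequence_alt num
instance (num : Int) (out : List Int) : Decidable (Spec_ulam_sequence num out) := by unfold Spec_ulam_sequence; infer_instance

-- ===== CLAIM (what is proved, stated in full; the proofs are below) =====
def Claim_equal_ulam_sequence : Prop := ∀ (num : Int), Dom_ulam_sequence num → Pre_ulam_sequence num → Spec_ulam_sequence num (ulam_sequence num)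

-- ===== LEMMAS AND PROOFS =====

-- B's per-candidate count: representations of m as u + (m - u) with 2u < m, scanning `it`, partners looked up in `seq`
def ulamPC (it seq : List Int) (m : Int) : Int :=
  it.foldl (fun r u => if 2 * u < m ∧ (m - u) ∈ seq then r + 1 else r) 0

-- the invariant tying A's count_sums table and B's bitmap to the shared sequence
def ulamInv (num n : Int) (seq : List Int) (cs : Array Int) (bm : Array Bool) : Prop :=
  cs.size = (2 * num).toNat ∧
  bm.size = (num + 1).toNat ∧
  seq.Pairwise (· < ·) ∧
  (∀ u ∈ seq, 1 ≤ u ∧ u < n) ∧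
  (∀ m : Int, 2 ≤ m → m ≤ 2 * num → cs.getD (m - 1).toNat 0 = ulamPC seq seq m) ∧
  (∀ k : Int, 0 ≤ k → k ≤ num → (bm.getD k.toNat false = true ↔ k ∈ seq))

lemma arr_getD_toList {α : Type} (a : Array α) (i : Nat) (d : α) :
    a.getD i d = a.toList.getD i d := by
  rw [Array.getD_eq_getD_getElem?, List.getD_eq_getElem?_getD, Array.getElem?_toList]

lemma getD_set_list {α : Type} (xs : List α) (i j : Nat) (v d : α) :
    (xs.set i v).getD j d = if i = j ∧ i < xs.length then v else xs.getD j d := by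
  rw [List.getD_eq_getElem?_getD, List.getElem?_set, List.getD_eq_getElem?_getD]
  by_cases h1 : i = j
  · subst h1
    by_cases h2 : i < xs.length
    · simp [h2]
    · simp [h2]
  · simp [h1]

lemma foldl_arr_toList {α : Type} (f : Array α → Int → Array α) (g : List α → Int → List α)
    (h : ∀ a u, (f a u).toList = g a.toList u) :
    ∀ (l : List Int) (a : Array α), (l.foldl f a).toList = l.foldl g a.toList := by
  intro l
  induction l with
  | nil => intro a; rfl
  | cons x xs ih => intro a; simp only [List.foldl_cons, ih, h]

lemma ulamPC_eq_countP (it seq : List Int) (m : Int) :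
    ulamPC it seq m = (it.countP (fun u => decide (2 * u < m ∧ (m - u) ∈ seq)) : Int) := by
  unfold ulamPC
  rw [show (fun r u => if 2 * u < m ∧ (m - u) ∈ seq then r + 1 else r)
      = (fun (acc : Int) x => if (fun u => decide (2 * u < m ∧ (m - u) ∈ seq)) x = true then acc + 1 else acc) by
    funext r u; simp]
  rw [PySem.List.foldl_count_if]
  simp

-- appending a fresh candidate n adds exactly [m - n ∈ seq] representations
lemma ulamPC_append (seq : List Int) (n m : Int)
    (hb : ∀ u ∈ seq, 1 ≤ u ∧ u < n) (hnd : seq.Nodup) :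
    ulamPC (seq ++ [n]) (seq ++ [n]) m
      = ulamPC seq seq m + (if (m - n) ∈ seq then 1 else 0) := by
  have hnmem : n ∉ seq := fun h => absurd (hb n h).2 (lt_irrefl n)
  rw [ulamPC_eq_countP, ulamPC_eq_countP, List.countP_append]
  have hlast : List.countP (fun u => decide (2 * u < m ∧ (m - u) ∈ seq ++ [n])) [n] = 0 := by
    have hno : ¬(2 * n < m ∧ (m - n) ∈ seq ++ [n]) := by
      rintro ⟨h1, h2⟩
      rcases List.mem_append.mp h2 with h | h
      · have := (hb _ h).2; omega
      · simp at h; omega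
    simp only [List.countP_cons, List.countP_nil, Nat.zero_add, decide_eq_false hno]
    simp
  rw [hlast]
  have main : ∀ l : List Int, l.Nodup → (∀ u ∈ l, 1 ≤ u ∧ u < n) →
      List.countP (fun u => decide (2 * u < m ∧ (m - u) ∈ seq ++ [n])) l
        = List.countP (fun u => decide (2 * u < m ∧ (m - u) ∈ seq)) l + (if (m - n) ∈ l then 1 else 0) := by
    intro l
    induction l with
    | nil => simp
    | cons u us ih =>
      intro hnd2 hb2
      have hbu := hb2 u (by simp)
      have ihh := ih (List.Nodup.of_cons hnd2) (fun v hv => hb2 v (by simp [hv]))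
      have hun : u ∉ us := (List.nodup_cons.mp hnd2).1
      simp only [List.countP_cons, ihh, List.mem_cons]
      by_cases hc : u = m - n
      · have hus : m - n ∉ us := by rw [← hc]; exact hun
        have hp' : (2 * u < m ∧ (m - u) ∈ seq ++ [n]) :=
          ⟨by omega, by rw [List.mem_append]; right; simp; omega⟩
        have hp : ¬(2 * u < m ∧ (m - u) ∈ seq) := by
          rintro ⟨_, h⟩
          have hmu : m - u = n := by omega
          rw [hmu] at h; exact hnmem h
        have hd1 : decide (2 * u < m ∧ (m - u) ∈ seq ++ [n]) = true := decide_eq_true hp'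
        have hd2 : decide (2 * u < m ∧ (m - u) ∈ seq) = false := decide_eq_false hp
        rw [hd1, hd2, if_neg hus, if_pos (Or.inl hc.symm)]
        simp
      · have hmu : m - u ≠ n := by omega
        have hmem : ((m - u) ∈ seq ++ [n]) ↔ ((m - u) ∈ seq) := by
          rw [List.mem_append]; simp [hmu]
        have hne : ¬ (m - n = u) := fun h => hc h.symm
        simp only [hmem, hne, false_or]
        omega
  rw [main seq hnd hb]
  push_cast
  split_ifs <;> omega

-- A's update loop (list form) adds exactly [m - n ∈ seq] to slot m - 1
lemma csUpdate_getD (n m num : Int) : ∀ (seq cs : List Int), cs.length = (2 * num).toNat →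
    (∀ u ∈ seq, 1 ≤ u ∧ u < n) → seq.Nodup → 3 ≤ n → n ≤ num → 2 ≤ m → m ≤ 2 * num →
    (seq.foldl (fun cs u => cs.set (u + n - 1).toNat (cs.getD (u + n - 1).toNat 0 + 1)) cs).getD (m - 1).toNat 0
      = cs.getD (m - 1).toNat 0 + (if (m - n) ∈ seq then 1 else 0) := by
  intro seq
  induction seq with
  | nil => intro cs _ _ _ _ _ _ _; simp [List.foldl]
  | cons u us ih =>
    intro cs hlen hb hnd hn hnum hm2 hm
    have hu : 1 ≤ u ∧ u < n := hb u (by simp)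
    have hlt : (u + n - 1).toNat < cs.length := by rw [hlen]; omega
    simp only [List.foldl_cons]
    rw [ih (cs.set (u + n - 1).toNat (cs.getD (u + n - 1).toNat 0 + 1))
        (by rw [List.length_set]; exact hlen)
        (fun v hv => hb v (by simp [hv])) (List.Nodup.of_cons hnd) hn hnum hm2 hm]
    rw [getD_set_list]
    by_cases hcase : m = u + n
    · have heq : (u + n - 1).toNat = (m - 1).toNat := by omega
      have hmn : m - n = u := by omega
      have hnotin : u ∉ us := (List.nodup_cons.mp hnd).1
      rw [if_pos ⟨heq, hlt⟩, hmn, if_neg hnotin, if_pos (by simp : u ∈ u :: us), ← heq]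
      ring
    · have heq : ¬ ((u + n - 1).toNat = (m - 1).toNat ∧ (u + n - 1).toNat < cs.length) := by
        rintro ⟨h, _⟩; omega
      have hmn : m - n ≠ u := by omega
      rw [if_neg heq]
      simp only [List.mem_cons, hmn, false_or]

lemma csUpdate_length (seq : List Int) (n : Int) (cs : List Int) :
    (seq.foldl (fun cs u => cs.set (u + n - 1).toNat (cs.getD (u + n - 1).toNat 0 + 1)) cs).length
      = cs.length := by
  induction seq generalizing cs with
  | nil => rfl
  | cons u us ih => rw [List.foldl_cons, ih, List.length_set]

-- the Array fold in A's step projects to the list fold above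
lemma csUpdate_toList (seq : List Int) (n : Int) (cs : Array Int) :
    (seq.foldl (fun cs u => cs.setIfInBounds (u + n - 1).toNat (cs.getD (u + n - 1).toNat 0 + 1)) cs).toList
      = seq.foldl (fun cs u => cs.set (u + n - 1).toNat (cs.getD (u + n - 1).toNat 0 + 1)) cs.toList := by
  apply foldl_arr_toList
  intro a u
  rw [Array.toList_setIfInBounds, arr_getD_toList]

lemma ulamPC_nonneg (it seq : List Int) (m : Int) : 0 ≤ ulamPC it seq m := by
  rw [ulamPC_eq_countP]; positivity

lemma ulamPC_cons (u : Int) (us seq : List Int) (m : Int) :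
    ulamPC (u :: us) seq m
      = (if 2 * u < m ∧ (m - u) ∈ seq then 1 else 0) + ulamPC us seq m := by
  rw [ulamPC_eq_countP, ulamPC_eq_countP, List.countP_cons]
  by_cases h : 2 * u < m ∧ (m - u) ∈ seq
  · simp only [decide_eq_true h, if_pos h]
    push_cast
    ring
  · simp only [decide_eq_false h, if_neg h]
    push_cast
    simp

lemma ulamPC_eq_zero (it seq : List Int) (m : Int)
    (h : ∀ u ∈ it, ¬ (2 * u < m)) : ulamPC it seq m = 0 := by
  rw [ulamPC_eq_countP]
  have : it.countP (fun u => decide (2 * u < m ∧ (m - u) ∈ seq)) = 0 := by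
    rw [List.countP_eq_zero]
    intro u hu
    simp only [decide_eq_true_eq, not_and]
    intro h2
    exact absurd h2 (h u hu)
  rw [this]; rfl

-- B's capped rescan computes min (ulamPC) 2, reading membership off the bitmap
lemma repsGo_eq_min (n num : Int) (bm : Array Bool) (seq : List Int)
    (hnum : n ≤ num)
    (hbm : ∀ k : Int, 0 ≤ k → k ≤ num → (bm.getD k.toNat false = true ↔ k ∈ seq)) :
    ∀ it : List Int, it.Pairwise (· < ·) → (∀ u ∈ it, 1 ≤ u) →
    ∀ r : Int, 0 ≤ r → r ≤ 1 →
    ulamRepsGo bm n it r = min (r + ulamPC it seq n) 2 := by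
  intro it
  induction it with
  | nil =>
    intro _ _ r hr0 hr1
    simp only [ulamRepsGo, ulamPC, List.foldl_nil]
    omega
  | cons u us ih =>
    intro hpw hpos r hr0 hr1
    have hupos : 1 ≤ u := hpos u (by simp)
    have hlt : ∀ v ∈ us, u < v := fun v hv => (List.pairwise_cons.mp hpw).1 v hv
    have ihh := ih (List.Pairwise.of_cons hpw) (fun v hv => hpos v (by simp [hv]))
    rw [ulamRepsGo]
    by_cases hbr : 2 * u ≥ n
    · rw [if_pos hbr]
      have hz : ulamPC (u :: us) seq n = 0 := by
        apply ulamPC_eq_zero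
        intro v hv
        rcases List.mem_cons.mp hv with h | h
        · omega
        · have := hlt v h; omega
      rw [hz]; omega
    · rw [if_neg hbr]
      have h2u : 2 * u < n := by omega
      have hk := hbm (n - u) (by omega) (by omega)
      rw [ulamPC_cons]
      by_cases hhit : bm.getD (n - u).toNat false = true
      · have hmem : (n - u) ∈ seq := hk.mp hhit
        have hcond : (2 * u < n ∧ (n - u) ∈ seq) := ⟨h2u, hmem⟩
        rw [if_pos hhit, if_pos hcond]
        by_cases hr2 : r + 1 = 2
        · rw [if_pos hr2]
          have := ulamPC_nonneg us seq n
          omega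
        · rw [if_neg hr2, ihh (r + 1) (by omega) (by omega)]
          omega
      · have hmem : (n - u) ∉ seq := fun h => hhit (hk.mpr h)
        rw [if_neg hhit, if_neg (by rintro ⟨_, h⟩; exact hmem h), ihh r hr0 hr1]
        omega

-- main loop correspondence: from any invariant state, the two folds produce the same sequence
lemma ulam_loop (fuel : Nat) : ∀ (num n : Int) (seq : List Int) (cs : Array Int) (bm : Array Bool),
    3 ≤ n → (num + 1 - n).toNat ≤ fuel → ulamInv num n seq cs bm →
    ((PySem.List.pyRange n (num + 1) 1).foldl ulamStepA (seq, cs)).1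
      = ((PySem.List.pyRange n (num + 1) 1).foldl ulamStepB (seq, bm)).1 := by
  induction fuel with
  | zero =>
    intro num n seq cs bm h3 hf hinv
    rw [PySem.List.pyRange_one_eq_nil (by omega : num + 1 ≤ n)]
    rfl
  | succ k ih =>
    intro num n seq cs bm h3 hf hinv
    by_cases hend : num + 1 ≤ n
    · rw [PySem.List.pyRange_one_eq_nil hend]
      rfl
    · push Not at hend
      have hn_num : n ≤ num := by omega
      obtain ⟨hlen, hbmlen, hpw, hb, hcnt, hbm⟩ := hinv
      have hnd : seq.Nodup := hpw.imp (fun h => ne_of_lt h)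
      have hnmem : n ∉ seq := fun h => absurd (hb n h).2 (lt_irrefl n)
      have hread : cs.getD (n - 1).toNat 0 = ulamPC seq seq n :=
        hcnt n (by omega) (by omega)
      have hreps : ulamRepsGo bm n seq 0 = min (0 + ulamPC seq seq n) 2 :=
        repsGo_eq_min n num bm seq hn_num hbm seq hpw (fun u hu => (hb u hu).1) 0 le_rfl (by omega)
      have hpcpos := ulamPC_nonneg seq seq n
      rw [PySem.List.pyRange_one_cons (by omega : n < num + 1)]
      simp only [List.foldl_cons]
      by_cases hone : ulamPC seq seq n = 1
      · have hA : ulamStepA (seq, cs) n = (seq ++ [n],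
            seq.foldl (fun cs u => cs.setIfInBounds (u + n - 1).toNat (cs.getD (u + n - 1).toNat 0 + 1)) cs) := by
          unfold ulamStepA
          rw [if_pos (by rw [hread]; exact hone)]
        have hB : ulamStepB (seq, bm) n = (seq ++ [n], bm.setIfInBounds n.toNat true) := by
          show (if ulamRepsGo bm n seq 0 = 1
              then (seq ++ [n], bm.setIfInBounds n.toNat true) else (seq, bm)) = _
          rw [if_pos (by rw [hreps]; omega)]
        rw [hA, hB]
        apply ih num (n + 1) (seq ++ [n]) _ _ (by omega) (by omega)
        refine ⟨?_, ?_, ?_, ?_, ?_, ?_⟩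
        · rw [← Array.length_toList, csUpdate_toList, csUpdate_length, Array.length_toList]
          exact hlen
        · rw [Array.size_setIfInBounds]; exact hbmlen
        · rw [List.pairwise_append]
          exact ⟨hpw, by simp, fun a ha b hbm2 => by simp at hbm2; rw [hbm2]; exact (hb a ha).2⟩
        · intro u hu
          rcases List.mem_append.mp hu with h | h
          · have := hb u h; omega
          · simp at h; omega
        · intro m hm2 hm
          rw [arr_getD_toList, csUpdate_toList,
            csUpdate_getD n m num seq cs.toList (by rw [Array.length_toList]; exact hlen) hb hnd h3 hn_num hm2 hm,
            ← arr_getD_toList, hcnt m hm2 hm, ulamPC_append seq n m hb hnd]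
        · intro p hp0 hpnum
          rw [arr_getD_toList, Array.toList_setIfInBounds, getD_set_list, ← arr_getD_toList]
          by_cases hpn : p = n
          · rw [if_pos ⟨by omega, by rw [Array.length_toList, hbmlen]; omega⟩]
            simp [hpn]
          · rw [if_neg (by rintro ⟨h, _⟩; omega)]
            rw [hbm p hp0 hpnum]
            simp [List.mem_append, hpn]
      · have hA : ulamStepA (seq, cs) n = (seq, cs) := by
          unfold ulamStepA
          rw [if_neg (by rw [hread]; exact hone)]
        have hB : ulamStepB (seq, bm) n = (seq, bm) := by
          show (if ulamRepsGo bm n seq 0 = 1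
              then (seq ++ [n], bm.setIfInBounds n.toNat true) else (seq, bm)) = _
          rw [if_neg (by rw [hreps]; omega)]
        rw [hA, hB]
        apply ih num (n + 1) seq cs bm (by omega) (by omega)
        exact ⟨hlen, hbmlen, hpw, fun u hu => by have := hb u hu; omega, hcnt, hbm⟩

-- the initial state (after count_sums[2] = 1 and the bitmap seeded with 1, 2) satisfies the invariant at candidate 3
lemma ulam_init (num : Int) (h3 : 3 ≤ num) :
    ulamInv num 3 [1, 2]
      ((((PySem.List.pyRange 0 (2 * num) 1).map (fun _ => (0 : Int))).toArray).setIfInBounds 2 1)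
      (((Array.replicate (num + 1).toNat false).setIfInBounds 1 true).setIfInBounds 2 true) := by
  have hmap : (PySem.List.pyRange 0 (2 * num) 1).map (fun _ => (0 : Int))
      = List.replicate (2 * num).toNat 0 := by
    rw [List.map_const', PySem.List.length_pyRange_one]
    norm_num
  refine ⟨?_, ?_, by decide, by decide, ?_, ?_⟩
  · rw [Array.size_setIfInBounds, List.size_toArray, hmap, List.length_replicate]
  · rw [Array.size_setIfInBounds, Array.size_setIfInBounds, Array.size_replicate]
  · intro m hm2 hm
    rw [arr_getD_toList, Array.toList_setIfInBounds, List.toList_toArray, hmap, getD_set_list]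
    have hget0 : ∀ i : Nat, (List.replicate (2 * num).toNat (0 : Int)).getD i 0 = 0 := by
      intro i
      rw [List.getD_eq_getElem?_getD, List.getElem?_replicate]
      split <;> simp
    have hrhs : ulamPC [1, 2] [1, 2] m = if m = 3 then 1 else 0 := by
      simp only [ulamPC, List.foldl_cons, List.foldl_nil, List.mem_cons, List.not_mem_nil, or_false]
      split_ifs <;> omega
    rw [hrhs]
    by_cases hm3 : m = 3
    · rw [if_pos ⟨by omega, by rw [List.length_replicate]; omega⟩, if_pos hm3]
    · rw [if_neg (by rintro ⟨h, _⟩; omega), hget0, if_neg hm3]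
  · intro k hk0 hknum
    have hsz : (Array.replicate (num + 1).toNat false).size = (num + 1).toNat := Array.size_replicate
    rw [arr_getD_toList, Array.toList_setIfInBounds, getD_set_list]
    by_cases hk2 : k = 2
    · rw [if_pos ⟨by omega, by rw [Array.toList_setIfInBounds, List.length_set, Array.length_toList, hsz]; omega⟩]
      simp [hk2]
    · rw [if_neg (by rintro ⟨h, _⟩; omega)]
      rw [Array.toList_setIfInBounds, getD_set_list]
      by_cases hk1 : k = 1
      · rw [if_pos ⟨by omega, by rw [Array.length_toList, hsz]; omega⟩]
        simp [hk1]
      · rw [if_neg (by rintro ⟨h, _⟩; omega)]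
        have : (Array.replicate (num + 1).toNat false).toList.getD k.toNat false = false := by
          rw [Array.toList_replicate, List.getD_eq_getElem?_getD, List.getElem?_replicate]
          split <;> simp
        rw [this]
        simp [hk1, hk2]

-- ===== VERDICT (by name: the statement is the Claim_ definition above) =====
theorem ulam_sequence_spec : Claim_equal_ulam_sequence := by
  intro num _ hpre
  unfold Spec_ulam_sequence ulam_sequence ulam_sequence_alt
  by_cases h1 : num = 1
  · simp [h1]
  by_cases h2 : num = 2
  · subst h2
    rw [if_neg (by omega), if_pos rfl, if_neg (by omega)]
    rw [PySem.List.pyRange_one_eq_nil (by omega : (2 : Int) + 1 ≤ 3)]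
    rfl
  have h3 : 3 ≤ num := by unfold Pre_ulam_sequence at hpre; omega
  rw [if_neg h1, if_neg h2, if_neg h1]
  exact ulam_loop (num + 1 - 3).toNat num 3 [1, 2] _ _ (by omega) (le_refl _) (ulam_init num h3)
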